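-- pv_equiv track=rewrite | github.com/kingfly55/doc-hub | scripts/pipeline.py | format_plan_for_prompt
-- ===== SOURCE A (Python) =====
-- def format_plan_for_prompt(files: dict[str, str]) -> str:
--     """Format all plan files into a single prompt block."""
--     parts = []
--     if "plan.md" in files:
--         parts.append(f"### plan.md\n```markdown\n{files['plan.md']}\n```")
--
--     for name, content in sorted(files.items()):
--         if name == "plan.md":
--             continue
--         parts.append(f"### {name}\n```markdown\n{content}\n```")
--
--     return "\n\n".join(parts)
-- ===== SOURCE B (Python) =====
-- def format_plan_for_prompt(files: dict[str, str]) -> str: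
--     """Format all plan files into a single prompt block (plan.md first, rest sorted)."""
--     ordered = sorted(files.items(), key=lambda kv: (kv[0] != "plan.md", kv[0]))
--     return "\n\n".join(f"### {name}\n```markdown\n{content}\n```" for name, content in ordered)
-- ===== Notes on version B (the rewrite author's own statement) =====
-- stated objective: simpler
-- what changed: Replaces A's two differently-shaped passes (a special-case plan.md prepend plus a sorted loop with a skip branch) by one uniform pass over a single list ordered by the composite key (name != 'plan.md', name).
import Mathlib
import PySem

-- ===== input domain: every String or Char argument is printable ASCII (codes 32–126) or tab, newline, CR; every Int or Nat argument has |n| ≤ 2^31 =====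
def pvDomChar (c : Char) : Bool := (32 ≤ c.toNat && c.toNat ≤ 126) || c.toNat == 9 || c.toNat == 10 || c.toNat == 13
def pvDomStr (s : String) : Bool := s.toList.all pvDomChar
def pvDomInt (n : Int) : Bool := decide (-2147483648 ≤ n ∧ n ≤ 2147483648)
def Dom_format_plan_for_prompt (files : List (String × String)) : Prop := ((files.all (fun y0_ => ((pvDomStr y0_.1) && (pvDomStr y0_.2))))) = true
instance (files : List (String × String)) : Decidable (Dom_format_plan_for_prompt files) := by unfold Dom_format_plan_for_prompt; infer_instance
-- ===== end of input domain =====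

-- B replaces A's plan.md-prepend plus skip-branch loop by one uniform pass over a single
-- list ordered by the composite key (name != "plan.md", name); simpler, same cost.


-- ===== PORT A =====
-- f"### {name}\n```markdown\n{content}\n```"
def pvBlock (p : String × String) : String :=
  "### " ++ p.1 ++ "\n```markdown\n" ++ p.2 ++ "\n```"

def format_plan_for_prompt (files : List (String × String)) : String :=
  PySem.Str.join "\n\n"
    ((PySem.List.sorted2 files Prod.fst Prod.snd).foldl
      (fun acc p => if p.1 == "plan.md" then acc else acc ++ [pvBlock p])
      (if (files.map Prod.fst).contains "plan.md" then
        match files.lookup "plan.md" with   -- files["plan.md"]: first match (dict lookup)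
        | some v => ["### plan.md\n```markdown\n" ++ v ++ "\n```"]
        | none => []
      else []))

-- ===== PORT B =====
def format_plan_for_prompt_alt (files : List (String × String)) : String :=
  PySem.Str.join "\n\n"
    ((PySem.List.sorted2 files (fun p => p.1 != "plan.md") (fun p => p.1)).map pvBlock)

-- ===== PRECONDITION & SPEC =====
-- Pre_ excludes association lists with duplicate keys: A's parameter is a Python dict,
-- whose keys are necessarily distinct, so such lists represent no dict input at all.
def Pre_format_plan_for_prompt (files : List (String × String)) : Prop :=
  (files.map Prod.fst).Nodup
instance (files : List (String × String)) : Decidable (Pre_format_plan_for_prompt files) := by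
  unfold Pre_format_plan_for_prompt; infer_instance
def pvWitness_format_plan_for_prompt : (List (String × String)) :=
  [("plan.md", "the plan"), ("a.md", "x")]

def Spec_format_plan_for_prompt (files : List (String × String)) (out : String) : Prop := out = format_plan_for_prompt_alt files
instance (files : List (String × String)) (out : String) : Decidable (Spec_format_plan_for_prompt files out) := by unfold Spec_format_plan_for_prompt; infer_instance

-- ===== CLAIM (what is proved, stated in full; the proofs are below) =====
def Claim_equal_format_plan_for_prompt : Prop := ∀ (files : List (String × String)), Dom_format_plan_for_prompt files → Pre_format_plan_for_prompt files → Spec_format_plan_for_prompt files (format_plan_for_prompt files)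

-- ===== LEMMAS AND PROOFS =====

-- sorting by two keys is sorting by the lexicographic composite key
lemma sorted2_eq_sorted_toLex {α κ₁ κ₂ : Type} [LinearOrder κ₁] [LinearOrder κ₂]
    (xs : List α) (k1 : α → κ₁) (k2 : α → κ₂) :
    PySem.List.sorted2 xs k1 k2 false
      = PySem.List.sorted xs (fun x => toLex (k1 x, k2 x)) false := by
  rw [PySem.List.sorted_eq_foldl_insertBy]
  unfold PySem.List.sorted2
  have hbe : (fun a b => decide (k1 a < k1 b) || (!decide (k1 b < k1 a) && decide (k2 a < k2 b)))
      = (fun a b => decide ((toLex (k1 a, k2 a) : Lex (κ₁ × κ₂)) < toLex (k1 b, k2 b))) := by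
    funext a b
    rcases lt_trichotomy (k1 a) (k1 b) with h|h|h
    · simp [Prod.Lex.toLex_lt_toLex, h, asymm h]
    · simp [Prod.Lex.toLex_lt_toLex, h]
    · simp [Prod.Lex.toLex_lt_toLex, h, asymm h, h.ne']
  simp only [Bool.false_eq_true, if_false, hbe]

-- proof-side abbreviations
def keyA (p : String × String) : Lex (String × String) := toLex (p.1, p.2)
def keyB (p : String × String) : Lex (Bool × String) := toLex ((p.1 != "plan.md"), p.1)
def isPlan (p : String × String) : Bool := p.1 == "plan.md"

-- B's priority-sorted list = plan entry ++ non-plan entries of A's name-sorted list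
lemma sortedB_eq (files : List (String × String)) (hnd : (files.map Prod.fst).Nodup) :
    PySem.List.sorted files keyB false
      = (PySem.List.sorted files keyA false).filter isPlan
        ++ (PySem.List.sorted files keyA false).filter (fun p => !(isPlan p)) := by
  set sA := PySem.List.sorted files keyA false with hsA
  have hperm : sA.Perm files := PySem.List.sorted_perm files keyA false
  have hndA : (sA.map Prod.fst).Nodup := ((hperm.map Prod.fst).nodup_iff).mpr hnd
  have hpw : sA.Pairwise (fun a b => keyA a ≤ keyA b) := PySem.List.sorted_pairwise files keyA
  have hne : sA.Pairwise (fun a b => a.1 ≠ b.1) := by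
    have := hndA; rwa [List.Nodup, List.pairwise_map] at this
  apply PySem.List.sorted_eq_of_perm_of_pairwise_lt
  · exact (List.filter_append_perm _ sA).trans hperm
  · rw [List.pairwise_append]
    refine ⟨?_, ?_, ?_⟩
    · -- inside the plan block: two distinct plan.md keys are impossible
      refine ((hne.filter isPlan).imp_of_mem ?_)
      intro a b ha hb hab
      exact absurd (by
        have ha' := (List.of_mem_filter ha); have hb' := (List.of_mem_filter hb)
        simp [isPlan] at ha' hb'; rw [ha', hb']) hab
    · -- inside the non-plan block: strictly increasing names
      have h2 : sA.Pairwise (fun a b => keyA a ≤ keyA b ∧ a.1 ≠ b.1) := hpw.and hne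
      refine ((h2.filter _).imp_of_mem ?_)
      intro a b ha hb hab
      have hfst : a.1 < b.1 := by
        rcases (Prod.Lex.toLex_le_toLex.mp hab.1) with h|h
        · exact h
        · exact absurd h.1 hab.2
      have ha' := (List.of_mem_filter ha); have hb' := (List.of_mem_filter hb)
      simp only [isPlan, Bool.not_eq_eq_eq_not, Bool.not_true] at ha' hb'
      show keyB a < keyB b
      unfold keyB
      refine Prod.Lex.toLex_lt_toLex.mpr (Or.inr ⟨by simp [bne, ha', hb'], hfst⟩)
    · -- across: the plan entry precedes every non-plan entry
      intro a ha b hb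
      have ha' := (List.of_mem_filter ha); have hb' := (List.of_mem_filter hb)
      simp only [isPlan] at ha' hb'
      show keyB a < keyB b
      unfold keyB
      refine Prod.Lex.toLex_lt_toLex.mpr (Or.inl ?_)
      simp only [Bool.not_eq_eq_eq_not, Bool.not_true] at hb'
      simp [bne, ha', hb']

-- a dict's lookup hit means the key is a first-class key
lemma lookup_of_contains (l : List (String × String))
    (hc : (l.map Prod.fst).contains "plan.md" = true) :
    ∃ v, l.lookup "plan.md" = some v := by
  induction l with
  | nil => simp at hc
  | cons p t ih =>
    obtain ⟨k, c⟩ := p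
    by_cases hk : ("plan.md" : String) = k
    · subst hk; exact ⟨c, by simp⟩
    · simp only [List.map_cons, List.contains_cons] at hc
      have hc' : (t.map Prod.fst).contains "plan.md" = true := by
        rcases Bool.or_eq_true_iff.mp hc with h|h
        · exact absurd (beq_iff_eq.mp h) hk
        · exact h
      obtain ⟨v, hv⟩ := ih hc'
      exact ⟨v, by simp [List.lookup_cons, beq_eq_false_iff_ne.mpr hk, hv]⟩

-- with distinct keys, the entries keyed plan.md are exactly the looked-up one
lemma filter_isPlan_eq (l : List (String × String)) (hnd : (l.map Prod.fst).Nodup)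
    (v : String) (hv : l.lookup "plan.md" = some v) :
    l.filter isPlan = [("plan.md", v)] := by
  induction l with
  | nil => simp at hv
  | cons p t ih =>
    obtain ⟨k, c⟩ := p
    simp only [List.map_cons, List.nodup_cons] at hnd
    by_cases hk : ("plan.md" : String) = k
    · subst hk
      have hvc : c = v := by simpa [List.lookup_cons] using hv
      have ht : t.filter isPlan = [] := by
        rw [List.filter_eq_nil_iff]
        intro a ha hpa
        exact hnd.1 (by
          have : a.1 = "plan.md" := by simpa [isPlan] using hpa
          exact this ▸ List.mem_map_of_mem ha)
      simp [isPlan, ht, hvc]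
    · have hv' : t.lookup "plan.md" = some v := by
        simpa [List.lookup_cons, beq_eq_false_iff_ne.mpr hk] using hv
      have hkf : (k == "plan.md") = false := beq_eq_false_iff_ne.mpr (Ne.symm hk)
      simpa [isPlan, hkf] using ih hnd.2 hv'

-- ===== VERDICT (by name: the statement is the Claim_ definition above) =====
theorem format_plan_for_prompt_spec : Claim_equal_format_plan_for_prompt := by
  intro files _ hnd
  unfold Spec_format_plan_for_prompt format_plan_for_prompt format_plan_for_prompt_alt
  rw [(sorted2_eq_sorted_toLex files Prod.fst Prod.snd :
        _ = PySem.List.sorted files keyA false),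
      (sorted2_eq_sorted_toLex files (fun p => p.1 != "plan.md") (fun p => p.1) :
        _ = PySem.List.sorted files keyB false),
      show (fun x : String × String => toLex (x.1, x.2)) = keyA from rfl,
      show (fun x : String × String => toLex (x.1 != "plan.md", x.1)) = keyB from rfl,
      sortedB_eq files hnd]
  set sA := PySem.List.sorted files keyA false with hsA
  have hperm : sA.Perm files := PySem.List.sorted_perm files keyA false
  have hfun : (fun (acc : List String) (p : String × String) =>
        if p.1 == "plan.md" then acc else acc ++ [pvBlock p])
      = (fun acc p => if !(isPlan p) then acc ++ [pvBlock p] else acc) := by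
    funext acc p
    unfold isPlan
    cases hx : p.1 == "plan.md" <;> simp
  rw [hfun, PySem.List.foldl_append_if, List.map_append]
  congr 1
  by_cases hc : (files.map Prod.fst).contains "plan.md" = true
  · obtain ⟨v, hv⟩ := lookup_of_contains files hc
    have hfl : sA.filter isPlan = [("plan.md", v)] :=
      List.perm_singleton.mp ((hperm.filter isPlan).trans
        (by rw [filter_isPlan_eq files hnd v hv]))
    rw [if_pos hc, hv, hfl]
    rfl
  · have hmem : "plan.md" ∉ files.map Prod.fst := by simpa using hc
    have hfl : sA.filter isPlan = [] := by
      rw [List.filter_eq_nil_iff]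
      intro a ha hpa
      exact hmem (by
        have : a.1 = "plan.md" := by simpa [isPlan] using hpa
        exact this ▸ List.mem_map_of_mem (hperm.mem_iff.mp ha))
    rw [if_neg hc, hfl]
    rfl
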